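-- pv_equiv track=rewrite | github.com/mikechesterwang/Collection | max_continue_1_string.py | dfs
-- ===== SOURCE A (Python) =====
-- def dfs(n, k=5, s=0, c=0):
--     if c == k:
--         return 1 << (n - s)
--     if s == n:
--         return 0
--     else:
--         cnt = 0
--         cnt += dfs(n, k, s + 1, 0)
--         cnt += dfs(n, k, s + 1, c + 1)
--         return cnt
-- ===== SOURCE B (Python) =====
-- def dfs(n, k=5, s=0, c=0):
--     # Bottom-up DP over "distance from s" levels instead of exponential branching.
--     # At level d (position s+d), the only run-lengths the recursion can query are
--     # 0..d-1 (after at least one reset) and c+d (all-ones prefix).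
--     m = n - s
--     if c == k:
--         return 1 << m
--     F = {}
--     for cc in list(range(m)) + [c + m]:
--         F[cc] = 1 if cc == k else 0
--     for d in reversed(range(m)):
--         G = {}
--         for cc in list(range(d)) + [c + d]:
--             G[cc] = (1 << (m - d)) if cc == k else F[0] + F[cc + 1]
--         F = G
--     return F[c]
-- ===== Notes on version B (the rewrite author's own statement) =====
-- stated objective: faster
-- what changed: Replaces A's exponential two-way branching recursion with a bottom-up dynamic program over (level, current-run-length) states stored in a per-level dict.
import Mathlib
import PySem

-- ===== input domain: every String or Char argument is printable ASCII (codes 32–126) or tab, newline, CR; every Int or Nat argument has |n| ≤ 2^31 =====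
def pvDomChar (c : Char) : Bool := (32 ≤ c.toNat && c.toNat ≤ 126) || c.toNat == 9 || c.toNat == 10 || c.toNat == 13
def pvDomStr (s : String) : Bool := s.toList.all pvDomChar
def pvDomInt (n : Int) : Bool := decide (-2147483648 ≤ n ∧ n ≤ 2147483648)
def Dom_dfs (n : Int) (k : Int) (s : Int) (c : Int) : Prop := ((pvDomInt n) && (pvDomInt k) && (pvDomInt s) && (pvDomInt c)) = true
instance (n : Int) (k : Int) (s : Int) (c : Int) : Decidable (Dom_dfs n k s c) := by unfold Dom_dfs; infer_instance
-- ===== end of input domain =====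

-- B replaces A's exponential branching recursion by a bottom-up dict DP over
-- (level, current run length) states; equivalence is claimed for the return value on s ≤ n.

-- ===== PORT A =====
-- fuel = (n - s).toNat steps; under Pre_ (s ≤ n) the recursion always hits a
-- base case (c = k or s = n) before fuel runs out, so the fuel-0 fallback 0 is unreachable.
def dfsAux (n : Int) (k : Int) : Nat → Int → Int → Int
  | 0, s, c =>
      if c = k then (1 : Int) <<< (n - s).toNat
      else if s = n then 0
      else 0
  | f + 1, s, c =>
      if c = k then (1 : Int) <<< (n - s).toNat
      else if s = n then 0
      else dfsAux n k f (s + 1) 0 + dfsAux n k f (s + 1) (c + 1)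

def dfs (n : Int) (k : Int) (s : Int) (c : Int) : Int := dfsAux n k (n - s).toNat s c

-- ===== PORT B =====
-- one DP level: insert every key of the level with its value
def dfsLevel (keys : List Int) (g : Int → Int) : PySem.Dict Int Int :=
  keys.foldl (fun G cc => G.insert cc (g cc)) PySem.Dict.empty

def dfs_alt (n : Int) (k : Int) (s : Int) (c : Int) : Int :=
  let m := (n - s).toNat        -- m = n - s (n - s ≥ 0 under Pre_)
  if c = k then (1 : Int) <<< m
  else
    let F0 := dfsLevel (((List.range m).map Int.ofNat) ++ [c + (m : Int)])
                (fun cc => if cc = k then 1 else 0)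
    let F := ((List.range m).reverse).foldl
        (fun F d =>
          dfsLevel (((List.range d).map Int.ofNat) ++ [c + (d : Int)])
            (fun cc => if cc = k then (1 : Int) <<< (m - d)
                       else F.getD 0 0 + F.getD (cc + 1) 0))
        F0
    F.getD c 0

-- ===== PRECONDITION & SPEC =====
-- Pre_ excludes s > n, where Python A raises (ValueError on a negative shift) or recurses forever.
def Pre_dfs (n : Int) (_k : Int) (s : Int) (_c : Int) : Prop := s ≤ n
instance (n : Int) (k : Int) (s : Int) (c : Int) : Decidable (Pre_dfs n k s c) := by unfold Pre_dfs; infer_instance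
def pvWitness_dfs : Int × Int × Int × Int := (6, 2, 0, 0)

def Spec_dfs (n : Int) (k : Int) (s : Int) (c : Int) (out : Int) : Prop := out = dfs_alt n k s c
instance (n : Int) (k : Int) (s : Int) (c : Int) (out : Int) : Decidable (Spec_dfs n k s c out) := by unfold Spec_dfs; infer_instance

-- ===== CLAIM (what is proved, stated in full; the proofs are below) =====
def Claim_equal_dfs : Prop := ∀ (n : Int) (k : Int) (s : Int) (c : Int), Dom_dfs n k s c → Pre_dfs n k s c → Spec_dfs n k s c (dfs n k s c)

-- ===== LEMMAS AND PROOFS =====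

-- a level table looks up to g on its key list
lemma foldl_insert_getD (g : Int → Int) (x : Int) :
    ∀ (L : List Int) (D : PySem.Dict Int Int),
      (L.foldl (fun G cc => G.insert cc (g cc)) D).getD x 0
        = if x ∈ L then g x else D.getD x 0 := by
  intro L
  induction L with
  | nil => intro D; simp
  | cons a L ih =>
    intro D
    simp only [List.foldl_cons, ih, List.mem_cons]
    by_cases hL : x ∈ L
    · simp [hL]
    · by_cases hxa : x = a <;> simp [hL, hxa, PySem.Dict.getD_insert]

lemma dfsLevel_getD (keys : List Int) (g : Int → Int) (x : Int)
    (hx : x ∈ keys) : (dfsLevel keys g).getD x 0 = g x := by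
  unfold dfsLevel
  simpa [hx] using foldl_insert_getD g x keys PySem.Dict.empty

-- membership in a level's key list
lemma mem_levelKeys (d : Nat) (c x : Int) :
    x ∈ ((List.range d).map Int.ofNat) ++ [c + (d : Int)] ↔
      ((0 ≤ x ∧ x < (d : Int)) ∨ x = c + (d : Int)) := by
  simp only [List.mem_append, List.mem_map, List.mem_range, List.mem_singleton,
    Int.ofNat_eq_natCast]
  constructor
  · rintro (⟨j, hj, rfl⟩ | h)
    · exact Or.inl ⟨by omega, by exact_mod_cast hj⟩
    · exact Or.inr h
  · rintro (⟨h0, hd⟩ | h)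
    · exact Or.inl ⟨x.toNat, by omega, by omega⟩
    · exact Or.inr h

-- invariant for the bottom level (d = m)
lemma base_inv (n k s c : Int) (m : Nat) (hn : n = s + m) (x : Int)
    (hx : (0 ≤ x ∧ x < (m : Int)) ∨ x = c + (m : Int)) :
    (dfsLevel (((List.range m).map Int.ofNat) ++ [c + (m : Int)])
        (fun cc => if cc = k then 1 else 0)).getD x 0
      = dfsAux n k 0 (s + (m : Int)) x := by
  rw [dfsLevel_getD _ _ _ ((mem_levelKeys m c x).2 hx)]
  have hs : s + (m : Int) = n := by omega
  by_cases hxk : x = k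
  · have : (n - (s + (m : Int))).toNat = 0 := by omega
    simp [dfsAux, hxk, this]
  · simp [dfsAux, hxk, hs]

-- one DP step: the level-d table is correct if the level-(d+1) table is
lemma step_inv (n k s c : Int) (m d : Nat) (hd : d < m) (hn : n = s + m)
    (F : PySem.Dict Int Int)
    (hF : ∀ x : Int, ((0 ≤ x ∧ x < (d : Int) + 1) ∨ x = c + ((d : Int) + 1)) →
        F.getD x 0 = dfsAux n k (m - (d + 1)) (s + (d : Int) + 1) x)
    (x : Int)
    (hx : (0 ≤ x ∧ x < (d : Int)) ∨ x = c + (d : Int)) :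
    (dfsLevel (((List.range d).map Int.ofNat) ++ [c + (d : Int)])
        (fun cc => if cc = k then (1 : Int) <<< (m - d)
                   else F.getD 0 0 + F.getD (cc + 1) 0)).getD x 0
      = dfsAux n k (m - d) (s + (d : Int)) x := by
  rw [dfsLevel_getD _ _ _ ((mem_levelKeys d c x).2 hx)]
  have hfuel : m - d = (m - (d + 1)) + 1 := by omega
  by_cases hxk : x = k
  · have htn : (n - (s + (d : Int))).toNat = m - d := by omega
    rw [hfuel]
    simp [dfsAux, hxk, htn, hfuel]
  · have hsn : ¬ (s + (d : Int) = n) := by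
      have : (d : Int) < (m : Int) := by exact_mod_cast hd
      omega
    have h0 : F.getD 0 0 = dfsAux n k (m - (d + 1)) (s + (d : Int) + 1) 0 := by
      apply hF; left; constructor <;> omega
    have h1 : F.getD (x + 1) 0 = dfsAux n k (m - (d + 1)) (s + (d : Int) + 1) (x + 1) := by
      apply hF
      rcases hx with ⟨ha, hb⟩ | h
      · left; omega
      · right; omega
    rw [hfuel]
    simp only [dfsAux, hxk, hsn, if_false]
    rw [h0, h1]

-- folding the loop body from level j down to level 0 preserves the invariant
lemma loop_inv (n k s c : Int) (m : Nat) (hn : n = s + m) :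
    ∀ (j : Nat), j ≤ m →
    ∀ F : PySem.Dict Int Int,
    (∀ x : Int, ((0 ≤ x ∧ x < (j : Int)) ∨ x = c + (j : Int)) →
        F.getD x 0 = dfsAux n k (m - j) (s + (j : Int)) x) →
    (((List.range j).reverse).foldl
        (fun F d =>
          dfsLevel (((List.range d).map Int.ofNat) ++ [c + (d : Int)])
            (fun cc => if cc = k then (1 : Int) <<< (m - d)
                       else F.getD 0 0 + F.getD (cc + 1) 0))
        F).getD c 0 = dfsAux n k m s c := by
  intro j
  induction j with
  | zero =>
    intro _ F hF
    have := hF c (Or.inr (by simp))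
    simpa using this
  | succ j ih =>
    intro hj F hF
    rw [List.range_succ, List.reverse_append]
    simp only [List.reverse_singleton, List.singleton_append, List.foldl_cons]
    apply ih (by omega)
    intro x hx
    have := step_inv n k s c m j (by omega) hn F
      (by
        intro y hy
        have : F.getD y 0 = dfsAux n k (m - (j + 1)) (s + ((j : Int) + 1)) y := by
          apply hF
          push_cast
          rcases hy with h | h
          · left; omega
          · right; omega
        rw [this]; ring_nf)
      x hx
    exact this

-- ===== VERDICT (by name: the statement is the Claim_ definition above) =====
theorem dfs_spec : Claim_equal_dfs := by
  intro n k s c _ hpre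
  unfold Spec_dfs dfs dfs_alt
  by_cases hck : c = k
  · cases h : (n - s).toNat <;> simp [dfsAux, hck, h]
  · simp only [hck, if_false]
    set m := (n - s).toNat with hm
    have hn : n = s + m := by unfold Pre_dfs at hpre; omega
    have hbase := base_inv n k s c m hn
    have := loop_inv n k s c m hn m le_rfl
      (dfsLevel (((List.range m).map Int.ofNat) ++ [c + (m : Int)])
        (fun cc => if cc = k then 1 else 0))
      (by
        intro x hx
        rw [base_inv n k s c m hn x hx]
        have : m - m = 0 := by omega
        rw [this])
    rw [this]
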